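-- pv_equiv track=rewrite | github.com/futuredialchallenge/2024-RAG | reader.py | inverse_transpose_batch
-- ===== SOURCE A (Python) =====
-- def inverse_transpose_batch(turn_batch_list):
--     """
--     :param turn_batch_list: list of transpose dial batch
--     """
--     dialogs = []
--     total_turn_num = len(turn_batch_list)
--     # initialize
--     for idx_in_batch, _ in enumerate(turn_batch_list[0]['user']):
--         dialog = []
--         for turn_n in range(total_turn_num):
--             dial_turn = {}
--             turn_batch = turn_batch_list[turn_n]
--             for key, v_list in turn_batch.items():
--                 value = v_list[idx_in_batch]
--                 dial_turn[key] = value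
--             dialog.append(dial_turn)
--         dialogs.append(dialog)
--     return dialogs
-- ===== SOURCE B (Python) =====
-- def inverse_transpose_batch(turn_batch_list):
--     """
--     :param turn_batch_list: list of transpose dial batch
--     """
--     batch_size = len(turn_batch_list[0]['user'])
--     per_turn = [
--         [{k: v[i] for k, v in turn_batch.items()} for i in range(batch_size)]
--         for turn_batch in turn_batch_list
--     ]
--     dialogs = [list(turns) for turns in zip(*per_turn)]
--     return dialogs
-- ===== Notes on version B (the rewrite author's own statement) =====
-- stated objective: idiomatic
-- what changed: Replaces A's dialog-outer/turn-inner indexed nested loops with a build-then-transpose pass: an intermediate per-turn matrix of per-dialog dicts is built once, then transposed across turns with zip(*per_turn).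
import Mathlib
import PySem

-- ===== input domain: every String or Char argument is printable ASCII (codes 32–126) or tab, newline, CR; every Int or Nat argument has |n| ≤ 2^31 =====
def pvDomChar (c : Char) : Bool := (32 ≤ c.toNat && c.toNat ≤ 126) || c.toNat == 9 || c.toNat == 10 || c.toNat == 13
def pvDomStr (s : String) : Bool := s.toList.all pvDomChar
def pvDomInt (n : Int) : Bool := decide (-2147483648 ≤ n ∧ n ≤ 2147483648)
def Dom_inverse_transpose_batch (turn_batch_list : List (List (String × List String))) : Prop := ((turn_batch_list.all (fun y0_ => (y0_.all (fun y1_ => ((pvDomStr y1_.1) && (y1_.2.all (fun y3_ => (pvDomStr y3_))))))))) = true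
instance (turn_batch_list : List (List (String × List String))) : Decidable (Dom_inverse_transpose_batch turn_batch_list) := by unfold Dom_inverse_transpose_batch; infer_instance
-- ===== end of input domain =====

-- B replaces A's dialog-outer/turn-inner indexed nested loops by a build-then-transpose pass
-- (per-turn matrix of per-dialog dicts, then zip(*per_turn)); objective: idiomatic, same cost.

-- ===== PORT A =====
-- indexing (list getD, dict getD) is total here; Pre_ restricts to the inputs where
-- the Python indexes/key lookups succeed, so the defaults are never consulted there.
def inverse_transpose_batch (turn_batch_list : List (List (String × List String))) : List (List (List (String × String))) :=
  let total_turn_num := turn_batch_list.length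
  let user := PySem.Dict.getD (PySem.Dict.mk (turn_batch_list.headD [])) "user" []
  (List.range user.length).foldl (fun dialogs idx_in_batch =>
    dialogs ++ [
      (List.range total_turn_num).foldl (fun dialog turn_n =>
        let turn_batch := turn_batch_list.getD turn_n []
        dialog ++ [
          (turn_batch.foldl (fun dial_turn kv =>
            PySem.Dict.insert dial_turn kv.1 (kv.2.getD idx_in_batch "")) PySem.Dict.empty).items
        ]) []
    ]) []

-- ===== PORT B =====
-- zip(*per_turn): stops at the first exhausted row (mapM head? = none iff some row is empty)
def pvZip {α : Type} : List (List α) → List (List α)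
  | [] => []
  | x :: rest =>
    match hm : (x :: rest).mapM List.head? with
    | some heads => heads :: pvZip ((x :: rest).map List.tail)
    | none => []
termination_by xss => (xss.headD []).length
decreasing_by
  simp only [List.mapM_cons] at hm
  cases hx : x.head? with
  | none => simp [hx] at hm
  | some a =>
    cases x with
    | nil => simp at hx
    | cons b t => simp [List.headD]

def inverse_transpose_batch_alt (turn_batch_list : List (List (String × List String))) : List (List (List (String × String))) :=
  let batch_size := (PySem.Dict.getD (PySem.Dict.mk (turn_batch_list.headD [])) "user" []).length
  let per_turn := turn_batch_list.map (fun turn_batch =>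
    (List.range batch_size).map (fun i =>
      (turn_batch.foldl (fun d kv =>
        PySem.Dict.insert d kv.1 (kv.2.getD i "")) PySem.Dict.empty).items))
  pvZip per_turn

-- ===== PRECONDITION & SPEC =====
-- Pre_ = exactly the inputs where Python A returns: a nonempty batch list whose first
-- batch has a 'user' key, and every value list long enough for every in-batch index.
def Pre_inverse_transpose_batch (turn_batch_list : List (List (String × List String))) : Prop :=
  turn_batch_list ≠ [] ∧
  (turn_batch_list.headD []).any (fun kv => kv.1 == "user") ∧
  (∀ tb ∈ turn_batch_list, ∀ kv ∈ tb,
    (((((turn_batch_list.headD []).find? (fun kv' => kv'.1 == "user")).map Prod.snd).getD []).length) ≤ kv.2.length)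
instance (turn_batch_list : List (List (String × List String))) : Decidable (Pre_inverse_transpose_batch turn_batch_list) := by unfold Pre_inverse_transpose_batch; infer_instance

def pvWitness_inverse_transpose_batch : (List (List (String × List String))) := [[("user", ["a"])]]

def Spec_inverse_transpose_batch (turn_batch_list : List (List (String × List String))) (out : List (List (List (String × String)))) : Prop := out = inverse_transpose_batch_alt turn_batch_list
instance (turn_batch_list : List (List (String × List String))) (out : List (List (List (String × String)))) : Decidable (Spec_inverse_transpose_batch turn_batch_list out) := by unfold Spec_inverse_transpose_batch; infer_instance

-- ===== CLAIM (what is proved, stated in full; the proofs are below) =====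
def Claim_equal_inverse_transpose_batch : Prop := ∀ (turn_batch_list : List (List (String × List String))), Dom_inverse_transpose_batch turn_batch_list → Pre_inverse_transpose_batch turn_batch_list → Spec_inverse_transpose_batch turn_batch_list (inverse_transpose_batch turn_batch_list)

-- ===== LEMMAS AND PROOFS =====

theorem pv_foldl_app {α β : Type} (l : List α) (f : α → β) (init : List β) :
    l.foldl (fun a x => a ++ [f x]) init = init ++ l.map f := by
  induction l generalizing init with
  | nil => simp
  | cons x t ih => simp [List.foldl_cons, ih]

theorem pv_map_range_getD {α β : Type} (xs : List α) (d : α) (g : α → β) :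
    (List.range xs.length).map (fun t => g (xs.getD t d)) = xs.map g := by
  apply List.ext_getElem
  · simp
  · intro i h1 h2
    have hx : i < xs.length := by simpa using h2
    simp [List.getD_eq_getElem?_getD, List.getElem?_eq_getElem hx]

theorem pv_getD_map_range {β : Type} (n i : ℕ) (h : i < n) (f : ℕ → β) (d : β) :
    ((List.range n).map f).getD i d = f i := by
  simp [List.getD_eq_getElem?_getD, List.getElem?_eq_getElem, h]

theorem pv_tail_getD {α : Type} (xs : List α) (i : ℕ) (d : α) :
    xs.tail.getD i d = xs.getD (i + 1) d := by
  cases xs <;> simp [List.getD]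

theorem pv_mapM_head {α : Type} (d : α) (xss : List (List α)) (h : ∀ xs ∈ xss, xs ≠ []) :
    xss.mapM List.head? = some (xss.map (fun xs => xs.getD 0 d)) := by
  induction xss with
  | nil => simp
  | cons x rest ih =>
    have hx : x ≠ [] := h x (by simp)
    cases x with
    | nil => exact absurd rfl hx
    | cons a t =>
      simp [List.mapM_cons, ih (fun xs hm => h xs (by simp [hm])), List.getD]

theorem pv_pvZip_uniform {α : Type} (d : α) (n : ℕ) :
    ∀ (xss : List (List α)), xss ≠ [] → (∀ xs ∈ xss, xs.length = n) →
      pvZip xss = (List.range n).map (fun i => xss.map (fun xs => xs.getD i d)) := by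
  induction n with
  | zero =>
    intro xss hne hl
    cases xss with
    | nil => exact absurd rfl hne
    | cons x rest =>
      have hx : x = [] := List.eq_nil_of_length_eq_zero (hl x (by simp))
      subst hx
      rw [pvZip]
      split
      · next heads hm =>
          rw [List.mapM_cons] at hm
          simp at hm
      · simp
  | succ n ih =>
    intro xss hne hl
    cases xss with
    | nil => exact absurd rfl hne
    | cons x rest =>
      have hnn : ∀ xs ∈ (x :: rest), xs ≠ [] := by
        intro xs hm hnil
        have := hl xs hm
        simp [hnil] at this
      rw [pvZip]
      have hsome := pv_mapM_head d (x :: rest) hnn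
      split
      · next heads hm =>
          rw [hsome] at hm
          obtain rfl : ((x :: rest).map (fun xs => xs.getD 0 d)) = heads := Option.some_injective _ hm
          have ihr := ih ((x :: rest).map List.tail) (by simp)
            (by
              intro xs hm2
              simp only [List.mem_map] at hm2
              obtain ⟨ys, hys, rfl⟩ := hm2
              have := hl ys hys
              cases ys with
              | nil => simp at this
              | cons a t => simpa using this)
          rw [ihr]
          rw [List.range_succ_eq_map]
          simp only [List.map_cons, List.map_map]
          refine congrArg₂ List.cons rfl ?_
          apply List.map_congr_left
          intro i _
          refine congrArg₂ List.cons (pv_tail_getD x i d) ?_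
          apply List.map_congr_left
          intro xs _
          simp only [Function.comp]
          exact pv_tail_getD xs i d
      · next hm =>
          rw [hsome] at hm
          cases hm

theorem pv_B_closed {β : Type} (tbl : List (List (String × List String))) (hne : tbl ≠ [])
    (n : ℕ) (cell : List (String × List String) → ℕ → List β) :
    pvZip (tbl.map (fun tb => (List.range n).map (fun i => cell tb i)))
      = (List.range n).map (fun i => tbl.map (fun tb => cell tb i)) := by
  rw [pv_pvZip_uniform ([] : List β) n (tbl.map (fun tb => (List.range n).map (fun i => cell tb i)))
        (by simpa using hne)
        (by intro xs hm; simp only [List.mem_map] at hm; obtain ⟨tb, _, rfl⟩ := hm; simp)]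
  apply List.map_congr_left
  intro i hi
  simp only [List.mem_range] at hi
  simp only [List.map_map]
  apply List.map_congr_left
  intro tb _
  simp only [Function.comp]
  exact pv_getD_map_range n i hi _ ([] : List β)

theorem inverse_transpose_batch_eq_alt (tbl : List (List (String × List String))) (hne : tbl ≠ []) :
    inverse_transpose_batch tbl = inverse_transpose_batch_alt tbl := by
  unfold inverse_transpose_batch inverse_transpose_batch_alt
  simp only [pv_foldl_app, List.nil_append]
  rw [pv_B_closed tbl hne _
        (fun tb i => (tb.foldl (fun d kv => PySem.Dict.insert d kv.1 (kv.2.getD i "")) PySem.Dict.empty).items)]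
  apply List.map_congr_left
  intro i _
  rw [← pv_map_range_getD tbl ([] : List (String × List String))
        (fun tb => (tb.foldl (fun d kv => PySem.Dict.insert d kv.1 (kv.2.getD i "")) PySem.Dict.empty).items)]

-- ===== VERDICT (by name: the statement is the Claim_ definition above) =====
theorem inverse_transpose_batch_spec : Claim_equal_inverse_transpose_batch := by
  intro tbl _ hpre
  unfold Spec_inverse_transpose_batch
  exact inverse_transpose_batch_eq_alt tbl hpre.1
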